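-- pv_equiv track=rewrite | github.com/aditimahajan04/DAA | galey_shaply.py | wpreferM1overM
-- ===== SOURCE A (Python) =====
-- N = 3  # Number of men and women
--
-- def wpreferM1overM(prefer, w, m, m1):
--     # 'prefer' array is split: first N rows for men, next N rows for women
--     women_pref = prefer[N:]  # Slice to get women's preferences
--     for i in range(N):
--         # If 'm1' comes before 'm' in the list, she prefers 'm1' over 'm'
--         if women_pref[w][i] == m1:
--             return True
--         # If 'm' comes before 'm1', she prefers 'm' over 'm1'
--         if women_pref[w][i] == m:
--             return False
--     return False  # Ideally, we shouldn't reach here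
-- ===== SOURCE B (Python) =====
-- N = 3  # Number of men and women
--
-- def wpreferM1overM(prefer, w, m, m1):
--     # Compare the positions of the two men in the woman's preference list:
--     # she prefers m1 iff m1 appears strictly earlier than m.
--     row = prefer[N:][w][:N]
--     r1 = row.index(m1) if m1 in row else N
--     r = row.index(m) if m in row else N
--     return r1 < r
-- ===== Notes on version B (the rewrite author's own statement) =====
-- stated objective: idiomatic
-- what changed: Replaced the early-exit index loop with computing each man's first position in the woman's first-N preference row and comparing the two positions.
-- intended difference: When m == m1 and that man appears in the woman's first N preferences, A returns True (she would 'prefer' a man over himself); B returns False, the intended value since strict preference over oneself is impossible. — e.g. on wpreferM1overM([[0,1,2],[1,2,0],[2,0,1],[1,2,0],[0,2,1],[2,1,0]], 0, 1, 1): A returns true, B returns false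
import Mathlib
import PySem

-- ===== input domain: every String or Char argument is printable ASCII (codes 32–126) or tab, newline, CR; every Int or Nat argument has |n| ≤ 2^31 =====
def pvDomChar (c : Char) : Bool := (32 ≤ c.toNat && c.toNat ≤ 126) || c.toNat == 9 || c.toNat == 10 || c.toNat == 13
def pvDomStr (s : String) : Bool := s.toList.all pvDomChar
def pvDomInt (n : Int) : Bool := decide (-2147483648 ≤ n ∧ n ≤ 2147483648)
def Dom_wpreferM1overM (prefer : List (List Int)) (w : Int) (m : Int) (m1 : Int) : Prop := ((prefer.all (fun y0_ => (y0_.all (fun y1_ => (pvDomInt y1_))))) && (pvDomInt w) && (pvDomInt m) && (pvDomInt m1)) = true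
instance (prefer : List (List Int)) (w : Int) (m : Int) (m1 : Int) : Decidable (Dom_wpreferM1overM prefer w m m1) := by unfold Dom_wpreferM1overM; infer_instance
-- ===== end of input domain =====

set_option maxHeartbeats 1000000


-- B compares the first positions of the two men in the woman's first-N preference row
-- instead of A's early-exit index loop (objective: idiomatic); on m = m1 with the man
-- present, B returns False where A returns True (stated as the intended difference D_).

-- ===== PORT A =====
-- the 'for i in range(N)' loop with its two early returns; women_pref[w][i] is looked up
-- each iteration; a none (Python IndexError, excluded by Pre_) yields false here
def wpALoop (wp : List (List Int)) (w m m1 : Int) : List Int → Bool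
  | [] => false
  | i :: is =>
    match PySem.List.pyGet? wp w with
    | none => false
    | some row =>
      match PySem.List.pyGet? row i with
      | none => false
      | some x => if x = m1 then true else if x = m then false else wpALoop wp w m m1 is

def wpreferM1overM (prefer : List (List Int)) (w : Int) (m : Int) (m1 : Int) : Bool :=
  let women_pref := PySem.List.slice prefer (some 3) none
  wpALoop women_pref w m m1 (PySem.List.pyRange 0 3 1)

-- ===== PORT B =====
-- row = prefer[N:][w][:N]; r1 = row.index(m1) if m1 in row else N (same for m); r1 < r
def wpreferM1overM_alt (prefer : List (List Int)) (w : Int) (m : Int) (m1 : Int) : Bool :=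
  let row := PySem.List.slice ((PySem.List.pyGet? (PySem.List.slice prefer (some 3) none) w).getD []) none (some 3)
  let r1 : Int := if m1 ∈ row then ((PySem.List.index? row m1).getD 0 : Nat) else 3
  let r : Int := if m ∈ row then ((PySem.List.index? row m).getD 0 : Nat) else 3
  decide (r1 < r)

-- ===== PRECONDITION & SPEC =====
-- Pre_ excludes exactly the inputs on which Python A raises IndexError: w not a valid
-- (possibly negative) index into prefer[3:], or the selected row shorter than 3 with
-- neither m1 nor m occurring in it (the loop then runs past the end of the row).
def Pre_wpreferM1overM (prefer : List (List Int)) (w : Int) (m : Int) (m1 : Int) : Prop :=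
  PySem.Raise.InRange (prefer.drop 3).length w ∧
  (3 ≤ ((PySem.List.pyGet? (prefer.drop 3) w).getD []).length ∨
   m1 ∈ (PySem.List.pyGet? (prefer.drop 3) w).getD [] ∨
   m ∈ (PySem.List.pyGet? (prefer.drop 3) w).getD [])
instance (prefer : List (List Int)) (w : Int) (m : Int) (m1 : Int) : Decidable (Pre_wpreferM1overM prefer w m m1) := by unfold Pre_wpreferM1overM; infer_instance

def pvWitness_wpreferM1overM : List (List Int) × Int × Int × Int :=
  ([[0,1,2],[1,2,0],[2,0,1],[1,2,0],[0,2,1],[2,1,0]], 1, 2, 0)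

-- When m == m1 and that man appears in the woman's first N preferences, A returns True
-- (she would 'prefer' a man over himself); B returns False, the intended value since
-- strict preference over oneself is impossible.
def D_wpreferM1overM (prefer : List (List Int)) (w : Int) (m : Int) (m1 : Int) : Prop :=
  m = m1 ∧ m1 ∈ ((PySem.List.pyGet? (prefer.drop 3) w).getD []).take 3
instance (prefer : List (List Int)) (w : Int) (m : Int) (m1 : Int) : Decidable (D_wpreferM1overM prefer w m m1) := by unfold D_wpreferM1overM; infer_instance

def Spec_wpreferM1overM (prefer : List (List Int)) (w : Int) (m : Int) (m1 : Int) (out : Bool) : Prop := ¬ D_wpreferM1overM prefer w m m1 → out = wpreferM1overM_alt prefer w m m1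
instance (prefer : List (List Int)) (w : Int) (m : Int) (m1 : Int) (out : Bool) : Decidable (Spec_wpreferM1overM prefer w m m1 out) := by unfold Spec_wpreferM1overM; infer_instance

def pvDiffWitness_wpreferM1overM : List (List Int) × Int × Int × Int :=
  ([[0,1,2],[1,2,0],[2,0,1],[1,2,0],[0,2,1],[2,1,0]], 0, 1, 1)
def pvDiffWitnessOut_wpreferM1overM : Bool × Bool := (true, false)

-- ===== CLAIM (what is proved, stated in full; the proofs are below) =====
def Claim_unchanged_wpreferM1overM : Prop := ∀ (prefer : List (List Int)) (w : Int) (m : Int) (m1 : Int), Dom_wpreferM1overM prefer w m m1 → Pre_wpreferM1overM prefer w m m1 → Spec_wpreferM1overM prefer w m m1 (wpreferM1overM prefer w m m1)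
def Claim_changed_wpreferM1overM : Prop := Dom_wpreferM1overM (pvDiffWitness_wpreferM1overM.1) (pvDiffWitness_wpreferM1overM.2.1) (pvDiffWitness_wpreferM1overM.2.2.1) (pvDiffWitness_wpreferM1overM.2.2.2) ∧ Pre_wpreferM1overM (pvDiffWitness_wpreferM1overM.1) (pvDiffWitness_wpreferM1overM.2.1) (pvDiffWitness_wpreferM1overM.2.2.1) (pvDiffWitness_wpreferM1overM.2.2.2) ∧ D_wpreferM1overM (pvDiffWitness_wpreferM1overM.1) (pvDiffWitness_wpreferM1overM.2.1) (pvDiffWitness_wpreferM1overM.2.2.1) (pvDiffWitness_wpreferM1overM.2.2.2) ∧ wpreferM1overM (pvDiffWitness_wpreferM1overM.1) (pvDiffWitness_wpreferM1overM.2.1) (pvDiffWitness_wpreferM1overM.2.2.1) (pvDiffWitness_wpreferM1overM.2.2.2) = pvDiffWitnessOut_wpreferM1overM.1 ∧ wpreferM1overM_alt (pvDiffWitness_wpreferM1overM.1) (pvDiffWitness_wpreferM1overM.2.1) (pvDiffWitness_wpreferM1overM.2.2.1) (pvDiffWitness_wpreferM1overM.2.2.2) = pvDiffWitnessOut_wpreferM1overM.2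 ∧ pvDiffWitnessOut_wpreferM1overM.1 ≠ pvDiffWitnessOut_wpreferM1overM.2
def Claim_exact_wpreferM1overM : Prop := ∀ (prefer : List (List Int)) (w : Int) (m : Int) (m1 : Int), Dom_wpreferM1overM prefer w m m1 → Pre_wpreferM1overM prefer w m m1 → D_wpreferM1overM prefer w m m1 → wpreferM1overM prefer w m m1 ≠ wpreferM1overM_alt prefer w m m1

-- ===== LEMMAS AND PROOFS =====


-- reduce Python indexing at the literal indices 1 and 2 (used by the ports' loop)
theorem pyGetOne (a b : Int) (l : List Int) : PySem.List.pyGet? (a::b::l) 1 = some b := by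
  have h : (1:Int) = ((1:Nat):Int) := rfl
  rw [h, PySem.List.pyGet?_natCast]; rfl
theorem pyGetOne' (a : Int) : PySem.List.pyGet? [a] 1 = none := by
  rw [PySem.List.pyGet?_eq_none_iff]; simp [PySem.Raise.InRange]
theorem pyGetTwo' (a b : Int) : PySem.List.pyGet? [a,b] 2 = none := by
  rw [PySem.List.pyGet?_eq_none_iff]; simp [PySem.Raise.InRange]
theorem pyGetTwo (a b c : Int) (l : List Int) : PySem.List.pyGet? (a::b::c::l) 2 = some c := by
  have h : (2:Int) = ((2:Nat):Int) := rfl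
  rw [h, PySem.List.pyGet?_natCast]; rfl

-- B's computation on the selected row (prefer and w already resolved to 'row')
def wpBCore (row : List Int) (m m1 : Int) : Bool :=
  let t := row.take 3
  let r1 : Int := if m1 ∈ t then ((PySem.List.index? t m1).getD 0 : Nat) else 3
  let r : Int := if m ∈ t then ((PySem.List.index? t m).getD 0 : Nat) else 3
  decide (r1 < r)

-- A's loop only reads wp[w]; once that is known to be 'row' it behaves as on the singleton [row] at index 0
theorem wpALoop_congr (wp : List (List Int)) (w : Int) (row : List Int)
    (h : PySem.List.pyGet? wp w = some row) (m m1 : Int) (l : List Int) :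
    wpALoop wp w m m1 l = wpALoop [row] 0 m m1 l := by
  induction l with
  | nil => simp [wpALoop]
  | cons i is ih => simp only [wpALoop, h, PySem.List.pyGet?_zero_cons, ih]

-- the heart: outside the change region, A's three-step early-exit scan of 'row'
-- equals B's position comparison (both treat a run-off-the-end as false)
theorem wpALoop_eq_core (row : List Int) (m m1 : Int)
    (hD : ¬ (m = m1 ∧ m1 ∈ row.take 3)) :
    wpALoop [row] 0 m m1 [0,1,2] = wpBCore row m m1 := by
  match row with
  | [] =>
    simp [wpALoop, wpBCore, PySem.List.pyGet?, PySem.List.pyIdx?]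
  | [a] =>
    simp only [List.take_succ_cons, List.take_nil] at hD
    simp only [wpALoop, wpBCore, List.take_succ_cons, List.take_nil, PySem.List.pyGet?_zero_cons]
    by_cases h1 : a = m1 <;> by_cases h2 : a = m <;>
      simp_all [PySem.List.pyGet?_zero_cons, pyGetOne, pyGetTwo, pyGetOne', pyGetTwo', PySem.List.index?_eq_idxOf?, List.idxOf?, List.findIdx?_cons] <;>
      (try split_ifs <;> simp_all) <;> omega
  | [a,b] =>
    simp only [List.take_succ_cons, List.take_nil] at hD
    simp only [wpALoop, wpBCore, List.take_succ_cons, List.take_nil, PySem.List.pyGet?_zero_cons]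
    by_cases h1 : a = m1 <;> by_cases h2 : a = m <;> by_cases h3 : b = m1 <;> by_cases h4 : b = m <;>
      simp_all [PySem.List.pyGet?_zero_cons, pyGetOne, pyGetTwo, pyGetOne', pyGetTwo', PySem.List.index?_eq_idxOf?, List.idxOf?, List.findIdx?_cons] <;>
      (try split_ifs <;> simp_all) <;> omega
  | a :: b :: c :: t =>
    simp only [List.take_succ_cons, List.take_zero] at hD
    simp only [wpALoop, wpBCore, List.take_succ_cons, List.take_zero, PySem.List.pyGet?_zero_cons]
    by_cases h1 : a = m1 <;> by_cases h2 : a = m <;> by_cases h3 : b = m1 <;> by_cases h4 : b = m <;>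
      by_cases h5 : c = m1 <;> by_cases h6 : c = m <;>
      simp_all [PySem.List.pyGet?_zero_cons, pyGetOne, pyGetTwo, pyGetOne', pyGetTwo', PySem.List.index?_eq_idxOf?, List.idxOf?, List.findIdx?_cons] <;>
      (try split_ifs <;> simp_all) <;> omega

-- inside D_, A finds m1 (= m) first and returns true
theorem wpALoop_true_of_mem (row : List Int) (m1 : Int)
    (hm : m1 ∈ row.take 3) :
    wpALoop [row] 0 m1 m1 [0,1,2] = true := by
  match row with
  | [] => simp at hm
  | [a] =>
    simp only [List.take_succ_cons, List.take_nil, List.mem_cons, List.not_mem_nil, or_false] at hm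
    simp [wpALoop, PySem.List.pyGet?_zero_cons, pyGetOne, pyGetOne', hm.symm]
  | [a,b] =>
    simp only [List.take_succ_cons, List.take_nil, List.mem_cons, List.not_mem_nil, or_false] at hm
    by_cases h1 : a = m1 <;> by_cases h2 : b = m1 <;>
      simp_all [wpALoop, PySem.List.pyGet?_zero_cons, pyGetOne, pyGetTwo, pyGetOne', pyGetTwo', eq_comm]
  | a :: b :: c :: t =>
    simp only [List.take_succ_cons, List.take_zero, List.mem_cons, List.not_mem_nil, or_false] at hm
    by_cases h1 : a = m1 <;> by_cases h2 : b = m1 <;> by_cases h3 : c = m1 <;>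
      simp_all [wpALoop, PySem.List.pyGet?_zero_cons, pyGetOne, pyGetTwo, pyGetOne', pyGetTwo', eq_comm]

-- inside D_, B compares the man's position with itself and returns false
theorem wpBCore_false_of_eq (row : List Int) (m : Int) :
    wpBCore row m m = false := by
  simp only [wpBCore]
  split <;> simp

-- rewrite both ports to the row-level forms
theorem wpreferM1overM_eq (prefer : List (List Int)) (w m m1 : Int) :
    wpreferM1overM prefer w m m1 =
      wpALoop [ (PySem.List.pyGet? (prefer.drop 3) w).getD [] ] 0 m m1 [0,1,2] ∨
    (PySem.List.pyGet? (prefer.drop 3) w = none ∧ wpreferM1overM prefer w m m1 = false) := by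
  unfold wpreferM1overM
  have h3 : (3:Int) = ((3:Nat):Int) := rfl
  have hr' : PySem.List.pyRange 0 ((3:Nat):Int) 1 = [0,1,2] := by decide
  simp only [h3, PySem.List.slice_from_natCast, hr']
  cases h : PySem.List.pyGet? (prefer.drop 3) w with
  | none => exact Or.inr ⟨rfl, by simp [wpALoop, h]⟩
  | some row => exact Or.inl (by rw [wpALoop_congr _ _ _ h]; simp [h])

theorem wpreferM1overM_alt_eq (prefer : List (List Int)) (w m m1 : Int) :
    wpreferM1overM_alt prefer w m m1 =
      wpBCore ((PySem.List.pyGet? (prefer.drop 3) w).getD []) m m1 := by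
  unfold wpreferM1overM_alt wpBCore
  have h3 : (3:Int) = ((3:Nat):Int) := rfl
  simp only [h3, PySem.List.slice_from_natCast, PySem.List.slice_to_natCast]

-- ===== VERDICT (by name: the statements are the Claim_ definitions above) =====
theorem wpreferM1overM_spec : Claim_unchanged_wpreferM1overM := by
  intro prefer w m m1 _ hpre
  unfold Spec_wpreferM1overM
  intro hD
  unfold D_wpreferM1overM at hD
  rw [wpreferM1overM_alt_eq]
  rcases wpreferM1overM_eq prefer w m m1 with h | ⟨hn, _⟩
  · rw [h]; exact wpALoop_eq_core _ _ _ hD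
  · exact absurd hpre.1 (((PySem.List.pyGet?_eq_none_iff _ _).mp hn))

theorem wpreferM1overM_changed : Claim_changed_wpreferM1overM := by
  unfold Claim_changed_wpreferM1overM; decide

theorem wpreferM1overM_tight : Claim_exact_wpreferM1overM := by
  intro prefer w m m1 _ hpre hD
  obtain ⟨hmm, hmem⟩ := hD
  subst hmm
  rw [wpreferM1overM_alt_eq, wpBCore_false_of_eq]
  rcases wpreferM1overM_eq prefer w m m with h | ⟨hn, _⟩
  · rw [h, wpALoop_true_of_mem _ _ hmem]; simp
  · exact absurd hpre.1 (((PySem.List.pyGet?_eq_none_iff _ _).mp hn))
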